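-- pv_equiv track=rewrite | github.com/casuallysentient/lab_05 | get_fused_sequence_complement.py | get_fused_sequence_complement
-- ===== SOURCE A (Python) =====
-- def get_fused_sequence_complement(sequence_a, sequence_b):
--     """
--     This function receives two sequences of DNA and combines them, iterating over
--     the two sequences and alternating between characters from each one. If one
--     sequence is longer than the other, it will only add characters from both until
--     the shorter sequence runs out of characters, at which point it will simply add
--     the characters from the longer string onto the end. After it has completed
--     this, it passes the combo string to get_complement, which returns a complement
--     DNA string that this function then returns to its reference in main().
--
--     :param sequence_a: the first of the two sequences passed
--     :param sequence_b: the second of the two sequences passed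
--     :return: the complement of the combo of the two strings received
--     """
--     combo_sequence = ""
--     if len(sequence_a) >= len(sequence_b):
--         longer_sequence = sequence_a
--     else:
--         longer_sequence = sequence_b
--     for x in range(len(longer_sequence)):
--         if len(sequence_a) > x:
--             if sequence_a[x] in ("A", "T", "C", "G"):
--                 combo_sequence = combo_sequence + sequence_a[x]
--         if len(sequence_b) > x:
--             if sequence_b[x] in ("A", "T", "C", "G"):
--                 combo_sequence = combo_sequence + sequence_b[x]
--     comp_sequence = get_complement(combo_sequence)
--     return comp_sequence
--
-- def get_complement(combo_sequence):
--     """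
--     This function receives a combined DNA strand from get_fused_sequence_complement
--     and iterates over the string, constructing a new string where each character
--     is the pairing nucleotide to the original character.
--
--     :param combo_sequence: the already-combined sequence of the two initial
--     sequences
--     :return: the complement sequence to the one passed in
--     """
--     comp_sequence = ""
--     for x in range(len(combo_sequence)):
--         char = combo_sequence[x]
--         if char == "A":
--             comp_sequence += "T"
--         elif char == "C":
--             comp_sequence += "G"
--         elif char == "T":
--             comp_sequence += "A"
--         elif char == "G":
--             comp_sequence += "C"
--     return comp_sequence
-- ===== SOURCE B (Python) =====
-- # B: no per-character Python loop - strided slice assignment builds the interleaving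
-- # at C level, and one str.translate call complements A/T/C/G and deletes everything else.
-- def get_fused_sequence_complement(sequence_a, sequence_b):
--     n = min(len(sequence_a), len(sequence_b))
--     buf = [""] * (2 * n)
--     buf[0::2] = sequence_a[:n]
--     buf[1::2] = sequence_b[:n]
--     interleaved = "".join(buf) + sequence_a[n:] + sequence_b[n:]
--     delete = "".join(set(interleaved) - set("ATCG"))
--     table = str.maketrans("ATCG", "TAGC", delete)
--     return interleaved.translate(table)
-- ===== Notes on version B (the rewrite author's own statement) =====
-- stated objective: faster
-- what changed: Replaces A's per-index loop with length guards and a second branch-chain complement pass by loop-free bulk operations: strided slice assignment (buf[0::2]/buf[1::2]) builds the interleaving, and one str.translate call with a maketrans table complements A/T/C/G and deletes every other character in a single table-driven pass.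
import Mathlib
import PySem

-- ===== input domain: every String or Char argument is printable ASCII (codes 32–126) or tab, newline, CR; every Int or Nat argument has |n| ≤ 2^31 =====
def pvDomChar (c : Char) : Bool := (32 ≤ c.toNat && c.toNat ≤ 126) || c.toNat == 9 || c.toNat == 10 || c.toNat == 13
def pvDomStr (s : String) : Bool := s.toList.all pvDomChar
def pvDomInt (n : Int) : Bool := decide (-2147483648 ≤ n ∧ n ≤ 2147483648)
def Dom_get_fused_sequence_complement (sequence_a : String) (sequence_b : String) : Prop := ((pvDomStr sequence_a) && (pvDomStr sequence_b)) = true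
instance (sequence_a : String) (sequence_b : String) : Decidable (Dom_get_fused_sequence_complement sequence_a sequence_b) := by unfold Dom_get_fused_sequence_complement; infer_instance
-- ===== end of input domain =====

-- B builds the interleaving by strided slice assignment and complements+deletes in one
-- translate-style table pass, replacing A's guarded index loop and branch-chain second pass
-- (objective: faster by a constant factor, measured).


-- ===== PORT A =====
-- sequence_x[x] is always guarded by 'len(sequence_x) > x', so getD is exact here
def pvValid (c : Char) : Bool := c == 'A' || c == 'T' || c == 'C' || c == 'G'

def pvStepA (la lb : List Char) (acc : List Char) (x : Nat) : List Char :=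
  let acc1 := if x < la.length then (if pvValid (la.getD x ' ') then acc ++ [la.getD x ' '] else acc) else acc
  if x < lb.length then (if pvValid (lb.getD x ' ') then acc1 ++ [lb.getD x ' '] else acc1) else acc1

def get_fused_sequence_complement (sequence_a : String) (sequence_b : String) : String :=
  let la := sequence_a.toList
  let lb := sequence_b.toList
  let longer := if la.length ≥ lb.length then la else lb
  let combo := (List.range longer.length).foldl (pvStepA la lb) []
  -- get_complement, inlined helper: loop over range(len(combo)) with the same branch chain
  let comp := (List.range combo.length).foldl (fun acc x =>
      let ch := combo.getD x ' '
      if ch = 'A' then acc ++ ['T']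
      else if ch = 'C' then acc ++ ['G']
      else if ch = 'T' then acc ++ ['A']
      else if ch = 'G' then acc ++ ['C']
      else acc) []
  String.ofList comp

-- ===== PORT B =====
-- buf[start::2] = src  (extended slice assignment at stride 2; buf holds the
-- one-character strings written, [] for a not-yet-assigned slot)
def pvSetStride : List (List Char) → Nat → List Char → List (List Char)
  | buf, _, [] => buf
  | buf, s, c :: cs => pvSetStride (buf.set s [c]) (s + 2) cs

def get_fused_sequence_complement_alt (sequence_a : String) (sequence_b : String) : String :=
  let la := sequence_a.toList
  let lb := sequence_b.toList
  let n := min la.length lb.length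
  let buf := List.replicate (2 * n) ([] : List Char)
  let buf := pvSetStride buf 0 (la.take n)      -- buf[0::2] = sequence_a[:n]
  let buf := pvSetStride buf 1 (lb.take n)      -- buf[1::2] = sequence_b[:n]
  let interleaved := buf.flatten ++ la.drop n ++ lb.drop n
  -- delete-set: every char of interleaved that is not A/T/C/G (order irrelevant: only membership is used)
  let del := PySem.Set.diff (PySem.Set.ofList interleaved) ['A', 'T', 'C', 'G']
  -- interleaved.translate(table): the four mapped chars, deletion for the delete set, identity otherwise
  String.ofList (interleaved.flatMap (fun c =>
    if c = 'A' then ['T'] else if c = 'T' then ['A'] else if c = 'C' then ['G']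
    else if c = 'G' then ['C'] else if PySem.Set.contains del c then [] else [c]))

-- ===== PRECONDITION & SPEC =====
def Spec_get_fused_sequence_complement (sequence_a : String) (sequence_b : String) (out : String) : Prop := out = get_fused_sequence_complement_alt sequence_a sequence_b
instance (sequence_a : String) (sequence_b : String) (out : String) : Decidable (Spec_get_fused_sequence_complement sequence_a sequence_b out) := by unfold Spec_get_fused_sequence_complement; infer_instance

-- ===== CLAIM (what is proved, stated in full; the proofs are below) =====
def Claim_equal_get_fused_sequence_complement : Prop := ∀ (sequence_a : String) (sequence_b : String), Dom_get_fused_sequence_complement sequence_a sequence_b → Spec_get_fused_sequence_complement sequence_a sequence_b (get_fused_sequence_complement sequence_a sequence_b)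

-- ===== LEMMAS AND PROOFS =====

-- per-character complement-or-delete (proof-only normal form both sides reduce to)
def pvCompB (c : Char) : List Char :=
  if c = 'A' then ['T'] else if c = 'T' then ['A'] else if c = 'C' then ['G'] else if c = 'G' then ['C'] else []

-- structural interleaving (proof-only helper)
def pvInter : List Char → List Char → List Char
  | [], ys => ys
  | x :: xs, [] => x :: xs
  | x :: xs, y :: ys => x :: y :: pvInter xs ys

-- ---- A side: the combo loop computes the filtered structural interleaving ----
theorem pv_loopA_nil : ∀ (lb : List Char) (acc : List Char),
    (List.range lb.length).foldl (pvStepA [] lb) acc = acc ++ lb.filter pvValid := by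
  intro lb
  induction lb with
  | nil => intro acc; simp
  | cons b tb ih =>
    intro acc
    rw [List.length_cons, List.range_succ_eq_map, List.foldl_cons, List.foldl_map]
    have hstep : (fun (acc : List Char) (x : Nat) => pvStepA [] (b :: tb) acc (x + 1))
        = pvStepA [] tb := by
      funext acc x
      simp [pvStepA]
    rw [hstep, ih]
    by_cases hb : pvValid b = true <;> simp [pvStepA, hb]

theorem pv_loopB_nil : ∀ (la : List Char) (acc : List Char),
    (List.range la.length).foldl (pvStepA la []) acc = acc ++ la.filter pvValid := by
  intro la
  induction la with
  | nil => intro acc; simp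
  | cons a ta ih =>
    intro acc
    rw [List.length_cons, List.range_succ_eq_map, List.foldl_cons, List.foldl_map]
    have hstep : (fun (acc : List Char) (x : Nat) => pvStepA (a :: ta) [] acc (x + 1))
        = pvStepA ta [] := by
      funext acc x
      simp [pvStepA]
    rw [hstep, ih]
    by_cases ha : pvValid a = true <;> simp [pvStepA, ha]

theorem pv_loopA : ∀ (la lb : List Char) (acc : List Char),
    (List.range (max la.length lb.length)).foldl (pvStepA la lb) acc
      = acc ++ (pvInter la lb).filter pvValid := by
  intro la
  induction la with
  | nil => intro lb acc; simpa [pvInter] using pv_loopA_nil lb acc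
  | cons a ta ih =>
    intro lb acc
    cases lb with
    | nil => simpa [pvInter] using pv_loopB_nil (a :: ta) acc
    | cons b tb =>
      rw [List.length_cons, List.length_cons, Nat.succ_max_succ,
        List.range_succ_eq_map, List.foldl_cons, List.foldl_map]
      have hstep : (fun (acc : List Char) (x : Nat) => pvStepA (a :: ta) (b :: tb) acc (x + 1))
          = pvStepA ta tb := by
        funext acc x
        simp [pvStepA]
      rw [hstep, ih]
      by_cases ha : pvValid a = true <;> by_cases hb : pvValid b = true <;>
        simp [pvStepA, pvInter, ha, hb]

-- A's get_complement loop is a flatMap of the per-character complement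
theorem pv_comp_loop (f : Char → List Char) : ∀ (l : List Char) (acc : List Char),
    (List.range l.length).foldl (fun acc x => acc ++ f (l.getD x ' ')) acc = acc ++ l.flatMap f := by
  intro l
  induction l with
  | nil => intro acc; simp
  | cons c t ih =>
    intro acc
    rw [List.length_cons, List.range_succ_eq_map, List.foldl_cons, List.foldl_map]
    have hstep : (fun (acc : List Char) (x : Nat) => acc ++ f ((c :: t).getD (x + 1) ' '))
        = fun (acc : List Char) (x : Nat) => acc ++ f (t.getD x ' ') := by
      funext acc x; rfl
    rw [hstep, ih]
    simp [List.flatMap_cons]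

-- A's branch chain on a character equals acc ++ pvCompB of the character
theorem pv_chain_eq (combo : List Char) :
    (fun (acc : List Char) (x : Nat) =>
      let ch := combo.getD x ' '
      if ch = 'A' then acc ++ ['T']
      else if ch = 'C' then acc ++ ['G']
      else if ch = 'T' then acc ++ ['A']
      else if ch = 'G' then acc ++ ['C']
      else acc)
    = fun (acc : List Char) (x : Nat) => acc ++ pvCompB (combo.getD x ' ') := by
  funext acc x
  simp only [pvCompB]
  split_ifs <;> simp_all

-- filtering to valid chars first does not change the flatMap (invalid chars map to [])
theorem pv_filter_flatMap : ∀ (l : List Char),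
    (l.filter pvValid).flatMap pvCompB = l.flatMap pvCompB := by
  intro l
  induction l with
  | nil => rfl
  | cons c t ih =>
    by_cases hc : pvValid c = true
    · simp [hc, List.flatMap_cons, ih]
    · have hz : pvCompB c = [] := by
        simp only [pvValid, Bool.or_eq_true, beq_iff_eq] at hc
        obtain ⟨⟨⟨h1, h2⟩, h3⟩, h4⟩ := by simpa [not_or] using hc
        simp [pvCompB, h1, h2, h3, h4]
      simp [hc, List.flatMap_cons, hz, ih]

theorem pv_longer_len (la lb : List Char) :
    (if la.length ≥ lb.length then la else lb).length = max la.length lb.length := by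
  split_ifs with h <;> omega

-- ---- B side: the strided writes build the structural interleaving ----
theorem pv_stride_shift : ∀ (src : List Char) (x y : List Char) (rest : List (List Char)) (s : Nat),
    pvSetStride (x :: y :: rest) (s + 2) src = x :: y :: pvSetStride rest s src := by
  intro src
  induction src with
  | nil => intro x y rest s; rfl
  | cons c cs ih =>
    intro x y rest s
    show pvSetStride ((x :: y :: rest).set (s + 2) [c]) (s + 2 + 2) cs = _
    rw [show (x :: y :: rest).set (s + 2) [c] = x :: y :: rest.set s [c] from rfl, ih]
    rfl

theorem pv_stride_inter : ∀ (ca cb : List Char), ca.length = cb.length →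
    (pvSetStride (pvSetStride (List.replicate (2 * ca.length) ([] : List Char)) 0 ca) 1 cb).flatten
      = pvInter ca cb := by
  intro ca
  induction ca with
  | nil =>
    intro cb h
    have : cb = [] := List.eq_nil_of_length_eq_zero h.symm
    subst this; rfl
  | cons c cs ih =>
    intro cb h
    cases cb with
    | nil => simp at h
    | cons d ds =>
      have hlen : cs.length = ds.length := by simpa using h
      have hrep : List.replicate (2 * (c :: cs).length) ([] : List Char)
          = [] :: [] :: List.replicate (2 * cs.length) ([] : List Char) := by
        rw [List.length_cons, show 2 * (cs.length + 1) = 2 + 2 * cs.length by ring,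
          List.replicate_add]
        rfl
      rw [hrep]
      show (pvSetStride (pvSetStride (([] :: [] :: _).set 0 [c]) 2 cs) 1 (d :: ds)).flatten = _
      rw [List.set_cons_zero]
      rw [show (2 : Nat) = 0 + 2 from rfl, pv_stride_shift]
      show (pvSetStride (([c] :: [] :: _).set 1 [d]) 3 ds).flatten = _
      rw [show ([c] :: ([] : List Char) :: pvSetStride (List.replicate (2 * cs.length) []) 0 cs).set 1 [d]
          = [c] :: [d] :: pvSetStride (List.replicate (2 * cs.length) []) 0 cs from rfl]
      rw [show (3 : Nat) = 1 + 2 from rfl, pv_stride_shift]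
      rw [List.flatten_cons, List.flatten_cons, ih ds hlen]
      simp [pvInter]


-- interleaving the common prefixes then appending the tails is the full interleaving
theorem pv_inter_take_drop : ∀ (la lb : List Char),
    pvInter (la.take (min la.length lb.length)) (lb.take (min la.length lb.length))
      ++ la.drop (min la.length lb.length) ++ lb.drop (min la.length lb.length)
      = pvInter la lb := by
  intro la
  induction la with
  | nil => intro lb; simp [pvInter]
  | cons a ta ih =>
    intro lb
    cases lb with
    | nil => simp [pvInter]
    | cons b tb =>
      simp only [List.length_cons, Nat.succ_min_succ, List.take_succ_cons, List.drop_succ_cons,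
        pvInter, List.cons_append]
      rw [← ih tb]

-- B's translate body equals pvCompB on every char of the translated string
theorem pv_translate_eq (l : List Char) :
    l.flatMap (fun c =>
      if c = 'A' then ['T'] else if c = 'T' then ['A'] else if c = 'C' then ['G']
      else if c = 'G' then ['C']
      else if PySem.Set.contains (PySem.Set.diff (PySem.Set.ofList l) ['A', 'T', 'C', 'G']) c then []
      else [c]) = l.flatMap pvCompB := by
  apply List.flatMap_congr
  intro c hc
  by_cases h1 : c = 'A'
  · simp [h1, pvCompB]
  · by_cases h2 : c = 'T'
    · simp [h1, h2, pvCompB]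
    · by_cases h3 : c = 'C'
      · simp [h1, h2, h3, pvCompB]
      · by_cases h4 : c = 'G'
        · simp [h1, h2, h3, h4, pvCompB]
        · have hmem : c ∈ PySem.Set.diff (PySem.Set.ofList l) ['A', 'T', 'C', 'G'] := by
            rw [PySem.Set.mem_diff]
            refine ⟨(PySem.Set.mem_ofList _ _).mpr hc, ?_⟩
            simp [h1, h2, h3, h4]
          have hct : PySem.Set.contains (PySem.Set.diff (PySem.Set.ofList l) ['A', 'T', 'C', 'G']) c = true := by
            rw [PySem.Set.contains_iff]; exact hmem
          simp [h1, h2, h3, h4, hct, pvCompB, hc]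

theorem pv_take_len_min_left (la lb : List Char) :
    (la.take (min la.length lb.length)).length = min la.length lb.length := by
  simp [List.length_take]
theorem pv_take_len_eq (la lb : List Char) :
    (la.take (min la.length lb.length)).length = (lb.take (min la.length lb.length)).length := by
  simp [List.length_take]

-- ===== VERDICT (by name: the statement is the Claim_ definition above) =====
theorem get_fused_sequence_complement_spec : Claim_equal_get_fused_sequence_complement := by
  intro sa sb _
  unfold Spec_get_fused_sequence_complement get_fused_sequence_complement
    get_fused_sequence_complement_alt
  simp only []
  rw [pv_longer_len, pv_loopA, pv_chain_eq, pv_comp_loop, pv_translate_eq]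
  simp only [List.nil_append]
  rw [pv_filter_flatMap]
  have hb := pv_stride_inter (sa.toList.take (min sa.toList.length sb.toList.length))
      (sb.toList.take (min sa.toList.length sb.toList.length))
      (pv_take_len_eq sa.toList sb.toList)
  rw [pv_take_len_min_left] at hb
  rw [hb, pv_inter_take_drop]
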